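-- pv_equiv track=rewrite | github.com/heyese/Old-Scripts | lines_backup.py | list_games
-- ===== SOURCE A (Python) =====
-- def take_turn(moves,move_taken):
--   # 'moves' is a list of tuples
--   # 'move_taken' is a tuple
--   # Idea is that we go through the elements of 'move_taken' in turn and remove any tuples containing those elements from 'moves'.
--   # Have found it's pretty treacherous to have a functionn that edits the arguments it takes (especially when function is used in recursion),
--   # so it seems important to make a copy and use that instead of the original
--   moves_copy = moves[:]
--   for move in moves_copy[:]:  # here I'm iterating over a copy of moves rather than moves itself, as moves itself is being modified by the iteration
--     for num in move_taken:
--       if num in move: # Remove move from moves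
--         moves_copy.remove(move)
--         break  # No point checking if other elements of move_taken are in 'move' since we've now removed it from the moves list
--
--   return moves_copy
--
-- def list_games(moves_list):
--   # Returns a list of lists, each list is a game
--   remaining_moves = moves_list[:]
--   if len(remaining_moves) <= 1:
--     list_of_games = [ remaining_moves ]
--     return list_of_games
--   else:
--     list_of_games = []
--     # Here we use recursion.
--     # We know that if we only have 1 (or 0) moves in a game, the total list of games is simply that one element.
--     # Now imagine we have a list [a, b, c, ..., n] of moves, and that the list [X, Y, Z, ..., Mx] are the remaining moves having taken move 'x'.
--     # Since this is a reduced list and finite, we assume we can calculate the total list of games for the remaining moves list, [G1, G2, ..., Gxv]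
--     # Then the total list of games is [[a]+G1, [a]+G2, ..., [a]+Gav, [b]+G1, [b]+G2, ..., [b]+Gbv, ... [n]+Gnv] - don't quite have the right subscripts
--     # here!  But hopefully you can see that, if in a trivial case we can work out a list and in a general case we can reduce it to something simply, we
--     # can eventually get there.
--     for move in remaining_moves:
--       for game in list_games(take_turn(remaining_moves,move)):
--         new_list = [ move ]
--         new_list.extend(game)
--         list_of_games.append(new_list)
--
--   return list_of_games
-- ===== SOURCE B (Python) =====
-- def list_games(moves_list):
--   # Iterative DFS with an explicit stack of (prefix, remaining) frames; the
--   # conflict pruning is a single filter comprehension instead of remove() calls.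
--   games = []
--   stack = [([], list(moves_list))]
--   while stack:
--     prefix, remaining = stack.pop()
--     if len(remaining) <= 1:
--       games.append(prefix + remaining)
--     else:
--       for move in reversed(remaining):
--         reduced = [m for m in remaining if not any(num in m for num in move)]
--         stack.append((prefix + [move], reduced))
--   return games
-- ===== Notes on version B (the rewrite author's own statement) =====
-- stated objective: alternative
-- what changed: The recursive enumeration is replaced by an iterative DFS over an explicit stack of (prefix, remaining) frames, and the remove()-based conflict pruning is replaced by a single filter comprehension.
-- outside the precondition, e.g. on list_games([(), (1,)]): A raises RecursionError, B does not finish within the time limit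
import Mathlib
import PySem

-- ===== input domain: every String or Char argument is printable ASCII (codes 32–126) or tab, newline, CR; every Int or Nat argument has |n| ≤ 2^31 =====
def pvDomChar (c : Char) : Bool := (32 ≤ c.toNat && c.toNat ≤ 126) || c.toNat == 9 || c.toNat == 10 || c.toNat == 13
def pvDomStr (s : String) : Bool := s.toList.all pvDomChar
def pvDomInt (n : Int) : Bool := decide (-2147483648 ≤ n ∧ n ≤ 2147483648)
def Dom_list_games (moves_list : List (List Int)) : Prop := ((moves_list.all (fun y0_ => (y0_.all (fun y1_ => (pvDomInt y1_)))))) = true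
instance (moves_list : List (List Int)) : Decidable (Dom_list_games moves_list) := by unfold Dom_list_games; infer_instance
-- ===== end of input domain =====

-- B replaces A's recursion by an iterative DFS over an explicit stack of (prefix, remaining)
-- frames and replaces the remove()-based conflict pruning by one filter pass (objective: alternative).
-- Both ports carry a fuel counter purely as a totality guard; inside Pre_ it never runs out.

-- ===== PORT A =====
-- take_turn: for move in moves_copy[:] / for num in move_taken: if num in move: remove + break.
-- The `.getD acc` arm of remove? is dead code (the element is always present; Python's remove never raises here).
def take_turn (moves : List (List Int)) (move_taken : List Int) : List (List Int) :=
  moves.foldl (fun acc move =>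
    if move_taken.any (fun num => move.contains num) then
      (PySem.List.remove? acc move).getD acc
    else acc) moves

-- fuel = list length, a totality guard only: the list strictly shrinks on each recursive call
-- except when a move is the empty list (excluded by Pre_, where Python raises RecursionError).
def list_games_fuel : Nat → List (List Int) → List (List (List Int))
  | fuel, remaining =>
    if remaining.length ≤ 1 then [remaining]
    else
      match fuel with
      | 0 => []
      | n + 1 =>
        remaining.foldl (fun acc move =>
          acc ++ (list_games_fuel n (take_turn remaining move)).map (fun game => move :: game)) []

def list_games (moves_list : List (List Int)) : List (List (List Int)) :=
  list_games_fuel moves_list.length moves_list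

-- ===== PORT B =====
-- reduced = [m for m in remaining if not any(num in m for num in move)]
def tt_alt (remaining : List (List Int)) (move : List Int) : List (List Int) :=
  remaining.filter (fun m => !(move.any (fun num => m.contains num)))

def pvFrameW (fr : List (List Int) × List (List Int) × Nat) : Nat :=
  (fr.2.1.length + 2) ^ fr.2.2

-- helper cited by lg_loop's termination proof (must precede it)
theorem pvFoldl_cons_map {α β : Type} (c : α → β) :
    ∀ (xs : List α) (st : List β),
      xs.foldl (fun st m => c m :: st) st = (xs.map c).reverse ++ st := by
  intro xs
  induction xs with
  | nil => intro st; simp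
  | cons x xs ih => intro st; simp [List.foldl_cons, ih]

-- the while-stack loop of B; each frame carries its fuel (totality guard, as in port A)
def lg_loop : List (List (List Int) × List (List Int) × Nat) → List (List (List Int)) → List (List (List Int))
  | [], games => games
  | (pfx, rem, f) :: stack, games =>
    if rem.length ≤ 1 then lg_loop stack (games ++ [pfx ++ rem])
    else
      match f with
      | 0 => lg_loop stack games
      | n + 1 =>
        lg_loop (rem.reverse.foldl (fun st move => (pfx ++ [move], tt_alt rem move, n) :: st) stack) games
  termination_by stack _ => (stack.map pvFrameW).sum
  decreasing_by
  · have : 0 < pvFrameW (pfx, rem, f) := Nat.pow_pos (by omega)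
    simp only [List.map_cons, List.sum_cons]
    omega
  · have : 0 < pvFrameW (pfx, rem, 0) := Nat.pow_pos (by omega)
    simp only [List.map_cons, List.sum_cons]
    omega
  · rw [pvFoldl_cons_map]
    simp only [List.map_cons, List.sum_cons, List.map_append, List.sum_append,
      List.map_reverse, List.sum_reverse, List.map_map, Function.comp_def,
      Nat.succ_eq_add_one]
    have h1 : (List.map (fun x : {m // m ∈ rem} => pvFrameW (pfx ++ [x.1], tt_alt rem x.1, n)) rem.attach).sum
        ≤ rem.length * (rem.length + 2) ^ n := by
      have hb : ∀ y ∈ List.map (fun x : {m // m ∈ rem} => pvFrameW (pfx ++ [x.1], tt_alt rem x.1, n)) rem.attach,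
          y ≤ (rem.length + 2) ^ n := by
        intro y hy
        simp only [List.mem_map] at hy
        obtain ⟨x, _, rfl⟩ := hy
        refine Nat.pow_le_pow_left ?_ n
        have hle : (tt_alt rem x.1).length ≤ rem.length := by
          simpa [tt_alt] using List.length_filter_le (fun mm => !(x.1.any fun num => mm.contains num)) rem
        simpa [pvFrameW] using by omega
      have := List.sum_le_card_nsmul _ _ hb
      simpa [List.length_attach, smul_eq_mul] using this
    have h2 : rem.length * (rem.length + 2) ^ n < (rem.length + 2) ^ (n + 1) := by
      rw [pow_succ, mul_comm ((rem.length + 2) ^ n)]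
      exact Nat.mul_lt_mul_of_lt_of_le (by omega) (le_refl _) (Nat.pow_pos (by omega))
    exact Nat.add_lt_add_right (lt_of_le_of_lt h1 (by simpa [pvFrameW] using h2)) _

def list_games_alt (moves_list : List (List Int)) : List (List (List Int)) :=
  lg_loop [([], moves_list, moves_list.length)] []

-- ===== PRECONDITION & SPEC =====
-- Pre_ excludes lists of ≥ 2 moves containing an empty move: there Python A recurses on an
-- unchanged list and raises RecursionError (B's loop likewise never terminates).
def Pre_list_games (moves_list : List (List Int)) : Prop :=
  moves_list.length ≤ 1 ∨ [] ∉ moves_list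
instance (moves_list : List (List Int)) : Decidable (Pre_list_games moves_list) := by
  unfold Pre_list_games; infer_instance
def pvWitness_list_games : List (List Int) := [[1], [2], [3]]

def Spec_list_games (moves_list : List (List Int)) (out : List (List (List Int))) : Prop := out = list_games_alt moves_list
instance (moves_list : List (List Int)) (out : List (List (List Int))) : Decidable (Spec_list_games moves_list out) := by unfold Spec_list_games; infer_instance

-- ===== CLAIM (what is proved, stated in full; the proofs are below) =====
def Claim_equal_list_games : Prop := ∀ (moves_list : List (List Int)), Dom_list_games moves_list → Pre_list_games moves_list → Spec_list_games moves_list (list_games moves_list)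

-- ===== LEMMAS AND PROOFS =====

-- A's remove()-loop equals B's filter: invariant over the processed prefix.
theorem take_turn_gen (mt : List Int) :
    ∀ (suffix pref : List (List Int)),
      (∀ m ∈ pref, (mt.any fun num => m.contains num) = false) →
      suffix.foldl (fun acc move =>
          if mt.any (fun num => move.contains num) then
            (PySem.List.remove? acc move).getD acc
          else acc) (pref ++ suffix)
        = pref ++ suffix.filter (fun m => !(mt.any fun num => m.contains num)) := by
  intro suffix
  induction suffix with
  | nil => intro pref _; simp
  | cons m rest ih =>
    intro pref hpref
    by_cases hm : (mt.any fun num => m.contains num) = true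
    · have hnot : m ∉ pref := by
        intro hmem
        have h2 := hpref m hmem
        rw [hm] at h2
        exact absurd h2 (by decide)
      have hrem : PySem.List.remove? (pref ++ m :: rest) m = some (pref ++ rest) := by
        rw [PySem.List.remove?_eq_some_erase _ m (by simp)]
        rw [List.erase_append_right _ hnot, List.erase_cons_head]
      rw [List.foldl_cons, if_pos hm, hrem, Option.getD_some, ih pref hpref]
      have hm' : (mt.any fun num => decide (num ∈ m)) = true := by simpa using hm
      simp [hm']
    · simp only [Bool.not_eq_true] at hm
      rw [List.foldl_cons, if_neg (by rw [hm]; simp)]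
      have hsplit : pref ++ m :: rest = (pref ++ [m]) ++ rest := by simp
      rw [hsplit, ih (pref ++ [m]) (by
        intro x hx
        rcases List.mem_append.1 hx with h | h
        · exact hpref x h
        · simp only [List.mem_singleton] at h
          rw [h]; exact hm)]
      have hm' : (mt.any fun num => decide (num ∈ m)) = false := by simpa using hm
      simp [hm']

theorem take_turn_eq_filter (moves : List (List Int)) (mt : List Int) :
    take_turn moves mt = tt_alt moves mt := by
  have := take_turn_gen mt moves [] (by intro m h; simp at h)
  simpa [take_turn, tt_alt] using this

-- one frame of B's stack contributes exactly A's recursive result, prefixed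
theorem loop_spec : ∀ (f : Nat) (rem pfx : List (List Int)) stack games,
    lg_loop ((pfx, rem, f) :: stack) games
      = lg_loop stack (games ++ (list_games_fuel f rem).map (fun g => pfx ++ g)) := by
  intro f
  induction f with
  | zero =>
    intro rem pfx stack games
    by_cases h : rem.length ≤ 1
    · rw [lg_loop, if_pos h, list_games_fuel, if_pos h]; simp
    · rw [lg_loop, if_neg h, list_games_fuel, if_neg h]; simp
  | succ n ih =>
    intro rem pfx stack games
    by_cases h : rem.length ≤ 1
    · rw [lg_loop, if_pos h, list_games_fuel, if_pos h]; simp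
    · rw [lg_loop, if_neg h, list_games_fuel, if_neg h]
      rw [pvFoldl_cons_map, List.map_reverse, List.reverse_reverse]
      have sub : ∀ (ms : List (List Int)) (stack : List _) (games : List (List (List Int))),
          lg_loop ((ms.map fun move => (pfx ++ [move], tt_alt rem move, n)) ++ stack) games
            = lg_loop stack (games ++ ms.flatMap fun move =>
                (list_games_fuel n (tt_alt rem move)).map (fun g => pfx ++ move :: g)) := by
        intro ms
        induction ms with
        | nil => intro stack games; simp
        | cons m ms' ihm =>
          intro stack games
          simp only [List.map_cons, List.cons_append]
          rw [ih (tt_alt rem m) (pfx ++ [m]) _ games, ihm]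
          simp [List.flatMap_cons]
      rw [sub rem stack games]
      congr 1
      simp only [PySem.List.foldl_append_eq_flatMap, List.nil_append, List.map_flatMap,
        take_turn_eq_filter, List.map_map, Function.comp_def]

-- ===== VERDICT (by name: the statement is the Claim_ definition above) =====
theorem list_games_spec : Claim_equal_list_games := by
  unfold Claim_equal_list_games
  intro moves_list _ _
  unfold Spec_list_games list_games list_games_alt
  rw [loop_spec]
  simp [lg_loop]
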